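-- pv_equiv track=rewrite | github.com/lcalmbach/open-data-insights | release.py | clean_unreleased_body
-- ===== SOURCE A (Python) =====
-- def clean_unreleased_body(unreleased_block: str) -> str:
--     lines = unreleased_block.splitlines()
--     body_lines = lines[1:] if lines and lines[0].startswith("## [Unreleased]") else lines
--
--     cleaned = []
--     for line in body_lines:
--         stripped = line.strip()
--         if stripped == "- _Nothing yet._":
--             continue
--         cleaned.append(line)
--
--     # Drop empty section headings (for example "### Added" with no bullets).
--     compact: list[str] = []
--     i = 0
--     while i < len(cleaned):
--         line = cleaned[i]
--         if line.startswith("### "):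
--             section_lines = [line]
--             i += 1
--             while i < len(cleaned) and not cleaned[i].startswith("### "):
--                 section_lines.append(cleaned[i])
--                 i += 1
--             has_items = any(l.strip().startswith("- ") for l in section_lines[1:])
--             if has_items:
--                 compact.extend(section_lines)
--         else:
--             compact.append(line)
--             i += 1
--
--     body = "\n".join(compact).strip()
--     return body
-- ===== SOURCE B (Python) =====
-- def clean_unreleased_body(unreleased_block: str) -> str:
--     lines = unreleased_block.splitlines()
--     if lines and lines[0].startswith("## [Unreleased]"):
--         lines = lines[1:]
--     lines = [l for l in lines if l.strip() != "- _Nothing yet._"]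
--
--     # Group lines: a headerless prefix group, then one group per "### " heading.
--     groups: list[list[str]] = []
--     for l in lines:
--         if l.startswith("### ") or not groups:
--             groups.append([l])
--         else:
--             groups[-1].append(l)
--
--     def keep(g: list[str]) -> bool:
--         if not g[0].startswith("### "):
--             return True
--         return any(l.strip().startswith("- ") for l in g[1:])
--
--     return "\n".join(l for g in groups if keep(g) for l in g).strip()
-- ===== Notes on version B (the rewrite author's own statement) =====
-- stated objective: simpler
-- what changed: A's index-driven outer/inner while loops over the cleaned list are replaced by a single group-then-filter pipeline: lines are grouped into a headerless prefix plus one group per section heading, empty-section groups are dropped by a predicate, and the kept groups are flattened and joined.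
import Mathlib
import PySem

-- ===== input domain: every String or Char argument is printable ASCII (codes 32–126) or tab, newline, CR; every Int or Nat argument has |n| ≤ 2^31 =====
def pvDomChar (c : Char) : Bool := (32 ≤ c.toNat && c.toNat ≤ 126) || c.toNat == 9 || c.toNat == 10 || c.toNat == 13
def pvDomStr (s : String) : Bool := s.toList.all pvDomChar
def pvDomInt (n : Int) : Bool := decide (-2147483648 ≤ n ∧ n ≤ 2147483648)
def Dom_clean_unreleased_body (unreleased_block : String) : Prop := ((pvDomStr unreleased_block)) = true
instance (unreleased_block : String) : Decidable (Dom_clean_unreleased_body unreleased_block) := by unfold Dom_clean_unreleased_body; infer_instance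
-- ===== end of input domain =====

-- B replaces A's index-driven nested while loops with a group-then-filter pipeline (simpler decomposition, same cost).

-- ===== PORT A =====
-- inner while loop of A: collect a section's body with span (takeWhile/dropWhile)
def cleanA_compact : List String → List String
  | [] => []
  | l :: rest =>
    if PySem.Str.startswith l "### " then
      let sect := rest.takeWhile (fun x => !PySem.Str.startswith x "### ")
      let rest' := rest.dropWhile (fun x => !PySem.Str.startswith x "### ")
      if sect.any (fun x => PySem.Str.startswith (PySem.Str.strip x) "- ") then
        (l :: sect) ++ cleanA_compact rest'
      else
        cleanA_compact rest'
    else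
      l :: cleanA_compact rest
  termination_by ls => ls.length
  decreasing_by
    · exact Nat.lt_succ_of_le (List.length_dropWhile_le _ _)
    · exact Nat.lt_succ_of_le (List.length_dropWhile_le _ _)
    · simp

def clean_unreleased_body (unreleased_block : String) : String :=
  let lines := PySem.Str.splitlines unreleased_block
  let body_lines :=
    match lines with
    | [] => lines
    | l0 :: rest => if PySem.Str.startswith l0 "## [Unreleased]" then rest else lines
  let cleaned := body_lines.foldl
    (fun acc line =>
      if PySem.Str.strip line == "- _Nothing yet._" then acc else acc ++ [line]) []
  PySem.Str.strip (PySem.Str.join "\n" (cleanA_compact cleaned))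

-- ===== PORT B =====
-- groups[-1].append(l)
def cleanB_appendLast : List (List String) → String → List (List String)
  | [], l => [[l]]
  | [g], l => [g ++ [l]]
  | g :: gs, l => g :: cleanB_appendLast gs l

def cleanB_group (groups : List (List String)) (l : String) : List (List String) :=
  if PySem.Str.startswith l "### " || groups.isEmpty then groups ++ [[l]]
  else cleanB_appendLast groups l

def cleanB_keep : List String → Bool
  | [] => true  -- unreachable: groups never contain an empty list
  | h :: t =>
    if !PySem.Str.startswith h "### " then true
    else t.any (fun x => PySem.Str.startswith (PySem.Str.strip x) "- ")

def clean_unreleased_body_alt (unreleased_block : String) : String :=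
  let lines0 := PySem.Str.splitlines unreleased_block
  let lines1 :=
    match lines0 with
    | [] => []
    | l0 :: rest => if PySem.Str.startswith l0 "## [Unreleased]" then rest else l0 :: rest
  let lines2 := lines1.filter (fun l => !(PySem.Str.strip l == "- _Nothing yet._"))
  let groups := lines2.foldl cleanB_group []
  PySem.Str.strip (PySem.Str.join "\n" ((groups.filter cleanB_keep).flatten))

-- ===== PRECONDITION & SPEC =====
def Spec_clean_unreleased_body (unreleased_block : String) (out : String) : Prop := out = clean_unreleased_body_alt unreleased_block
instance (unreleased_block : String) (out : String) : Decidable (Spec_clean_unreleased_body unreleased_block out) := by unfold Spec_clean_unreleased_body; infer_instance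

-- ===== CLAIM (what is proved, stated in full; the proofs are below) =====
def Claim_equal_clean_unreleased_body : Prop := ∀ (unreleased_block : String), Dom_clean_unreleased_body unreleased_block → Spec_clean_unreleased_body unreleased_block (clean_unreleased_body unreleased_block)

-- ===== LEMMAS AND PROOFS =====

-- unfolding lemma for cleanA_compact on a cons cell
theorem cleanA_nil : cleanA_compact [] = [] := by
  rw [cleanA_compact]

theorem cleanA_cons (l : String) (t : List String) :
    cleanA_compact (l :: t)
      = if PySem.Str.startswith l "### " then
          (if (t.takeWhile (fun x => !PySem.Str.startswith x "### ")).any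
                (fun x => PySem.Str.startswith (PySem.Str.strip x) "- ") then
            (l :: t.takeWhile (fun x => !PySem.Str.startswith x "### "))
              ++ cleanA_compact (t.dropWhile (fun x => !PySem.Str.startswith x "### "))
          else cleanA_compact (t.dropWhile (fun x => !PySem.Str.startswith x "### ")))
        else l :: cleanA_compact t := by
  rw [cleanA_compact]

-- A's skip-or-append fold is a filter
theorem foldl_skip_append (p : String → Bool) (l : List String) (acc : List String) :
    l.foldl (fun acc x => if p x then acc else acc ++ [x]) acc
      = acc ++ l.filter (fun x => !p x) := by
  induction l generalizing acc with
  | nil => simp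
  | cons h t ih =>
    cases hp : p h
    · simp only [List.foldl_cons, hp, Bool.false_eq_true, if_false, ih, List.filter_cons, hp,
        Bool.not_false, if_true, List.append_assoc, List.singleton_append]
    · simp only [List.foldl_cons, hp, if_true, ih, List.filter_cons, Bool.not_true,
        Bool.false_eq_true, if_false]

theorem appendLast_snoc (gs : List (List String)) (g : List String) (l : String) :
    cleanB_appendLast (gs ++ [g]) l = gs ++ [g ++ [l]] := by
  induction gs with
  | nil => rfl
  | cons h t ih =>
    cases t with
    | nil => simp [cleanB_appendLast]
    | cons h2 t2 => simpa [cleanB_appendLast] using ih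

-- a run of non-header lines is emitted verbatim by A's outer loop
theorem cleanA_span (rest : List String) :
    cleanA_compact rest
      = rest.takeWhile (fun x => !PySem.Str.startswith x "### ")
        ++ cleanA_compact (rest.dropWhile (fun x => !PySem.Str.startswith x "### ")) := by
  induction rest with
  | nil => simp
  | cons l t ih =>
    cases h : PySem.Str.startswith l "### "
    · rw [cleanA_cons]
      simp only [h, Bool.false_eq_true, if_false, List.takeWhile_cons, List.dropWhile_cons,
        Bool.not_false, if_true, List.cons_append]
      rw [ih]
    · rw [List.takeWhile_cons, List.dropWhile_cons]
      simp only [h, Bool.not_true, Bool.false_eq_true, if_false, List.nil_append]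

-- invariant of B's grouping fold with an open last group
theorem groups_open (rest : List String) :
    ∀ (gs : List (List String)) (g : List String),
    (((rest.foldl cleanB_group (gs ++ [g])).filter cleanB_keep).flatten : List String)
      = ((gs.filter cleanB_keep).flatten)
        ++ (if cleanB_keep (g ++ rest.takeWhile (fun x => !PySem.Str.startswith x "### ")) then
              g ++ rest.takeWhile (fun x => !PySem.Str.startswith x "### ") else [])
        ++ cleanA_compact (rest.dropWhile (fun x => !PySem.Str.startswith x "### ")) := by
  induction rest with
  | nil =>
    intro gs g
    simp only [List.foldl_nil, List.takeWhile_nil, List.dropWhile_nil, List.append_nil]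
    rw [cleanA_nil]
    rw [List.filter_append]
    cases hk : cleanB_keep g
    · simp [hk]
    · simp [hk]
  | cons l t ih =>
    intro gs g
    rw [List.foldl_cons]
    cases h : PySem.Str.startswith l "### "
    · -- non-header: appended to the open group
      have hstep : cleanB_group (gs ++ [g]) l = gs ++ [g ++ [l]] := by
        unfold cleanB_group
        simp only [h, Bool.false_or]
        rw [if_neg (by simp), appendLast_snoc]
      rw [hstep, ih gs (g ++ [l])]
      rw [List.takeWhile_cons, List.dropWhile_cons]
      simp only [h, Bool.not_false, if_true, List.append_assoc, List.singleton_append]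
    · -- header: close the open group, start a fresh one
      have hstep : cleanB_group (gs ++ [g]) l = (gs ++ [g]) ++ [[l]] := by
        unfold cleanB_group
        simp only [h, Bool.true_or, if_true, List.append_assoc]
      rw [hstep, ih (gs ++ [g]) [l]]
      have hkeep : cleanB_keep ([l] ++ t.takeWhile (fun x => !PySem.Str.startswith x "### "))
          = (t.takeWhile (fun x => !PySem.Str.startswith x "### ")).any
              (fun x => PySem.Str.startswith (PySem.Str.strip x) "- ") := by
        rw [List.singleton_append]
        unfold cleanB_keep
        simp only [h, Bool.not_true, Bool.false_eq_true, if_false]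
      rw [List.takeWhile_cons, List.dropWhile_cons]
      simp only [h, Bool.not_true, Bool.false_eq_true, if_false]
      rw [cleanA_cons]
      simp only [h, if_true]
      rw [List.filter_append]
      rw [hkeep]
      cases hk : cleanB_keep g <;>
        cases ha : (t.takeWhile (fun x => !PySem.Str.startswith x "### ")).any
          (fun x => PySem.Str.startswith (PySem.Str.strip x) "- ") <;>
        simp [hk]

-- main list-level equality: B's group-then-filter pipeline equals A's compacting loop
theorem compact_eq_groups (cleaned : List String) :
    (((cleaned.foldl cleanB_group []).filter cleanB_keep).flatten : List String)
      = cleanA_compact cleaned := by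
  cases cleaned with
  | nil =>
    simp only [List.foldl_nil, List.filter_nil, List.flatten_nil, cleanA_nil]
  | cons l rest =>
    have hstep : cleanB_group [] l = [] ++ [[l]] := by
      unfold cleanB_group
      simp
    rw [List.foldl_cons, hstep, groups_open rest [] [l]]
    rw [cleanA_cons]
    cases h : PySem.Str.startswith l "### "
    · have hkeep : cleanB_keep ([l] ++ rest.takeWhile (fun x => !PySem.Str.startswith x "### "))
          = true := by
        rw [List.singleton_append]
        unfold cleanB_keep
        simp only [h, Bool.not_false, if_true]
      rw [hkeep, if_pos rfl]
      simp only [Bool.false_eq_true, if_false, List.filter_nil, List.flatten_nil,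
        List.nil_append, List.cons_append]
      rw [cleanA_span rest]
    · have hkeep : cleanB_keep ([l] ++ rest.takeWhile (fun x => !PySem.Str.startswith x "### "))
          = (rest.takeWhile (fun x => !PySem.Str.startswith x "### ")).any
              (fun x => PySem.Str.startswith (PySem.Str.strip x) "- ") := by
        rw [List.singleton_append]
        unfold cleanB_keep
        simp only [h, Bool.not_true, Bool.false_eq_true, if_false]
      rw [hkeep]
      simp only [if_true, List.filter_nil, List.flatten_nil, List.nil_append,
        List.singleton_append]
      cases ha : (rest.takeWhile (fun x => !PySem.Str.startswith x "### ")).any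
          (fun x => PySem.Str.startswith (PySem.Str.strip x) "- ") <;>
        simp

-- ===== VERDICT (by name: the statement is the Claim_ definition above) =====
theorem clean_unreleased_body_spec : Claim_equal_clean_unreleased_body := by
  intro s _
  unfold Spec_clean_unreleased_body clean_unreleased_body clean_unreleased_body_alt
  dsimp only
  cases hl : PySem.Str.splitlines s with
  | nil =>
    dsimp only
    rw [foldl_skip_append]
    simp only [List.nil_append, compact_eq_groups]
  | cons l0 rest =>
    dsimp only
    cases h0 : PySem.Str.startswith l0 "## [Unreleased]" <;>
      simp only [Bool.false_eq_true, if_false, if_true] <;>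
      rw [foldl_skip_append] <;>
      simp only [List.nil_append, compact_eq_groups]
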